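-- pv_equiv track=rewrite | github.com/rdietric/collectd-plugins | python/lustre_bw.py | _haveMultipleFsInstances
-- ===== SOURCE A (Python) =====
-- def _haveMultipleFsInstances(instances):
--   fsNameArray = []
--   for fsInstance in instances:
--     if fsInstance is None:
--       continue
--
--     fsName = fsInstance.split('-',1)[0]
--     if fsName in fsNameArray:
--       return True
--     fsNameArray.append(fsName)
--
--   return False
-- ===== SOURCE B (Python) =====
-- def _haveMultipleFsInstances(instances):
--   prefixes = [fsInstance.split('-', 1)[0] for fsInstance in instances if fsInstance is not None]
--   return len(prefixes) != len(set(prefixes))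
-- ===== Notes on version B (the rewrite author's own statement) =====
-- stated objective: simpler
-- what changed: Replaces the incremental accumulator with per-element membership scans and early return by one comprehension building all prefixes plus a single set-cardinality comparison.
import Mathlib
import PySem

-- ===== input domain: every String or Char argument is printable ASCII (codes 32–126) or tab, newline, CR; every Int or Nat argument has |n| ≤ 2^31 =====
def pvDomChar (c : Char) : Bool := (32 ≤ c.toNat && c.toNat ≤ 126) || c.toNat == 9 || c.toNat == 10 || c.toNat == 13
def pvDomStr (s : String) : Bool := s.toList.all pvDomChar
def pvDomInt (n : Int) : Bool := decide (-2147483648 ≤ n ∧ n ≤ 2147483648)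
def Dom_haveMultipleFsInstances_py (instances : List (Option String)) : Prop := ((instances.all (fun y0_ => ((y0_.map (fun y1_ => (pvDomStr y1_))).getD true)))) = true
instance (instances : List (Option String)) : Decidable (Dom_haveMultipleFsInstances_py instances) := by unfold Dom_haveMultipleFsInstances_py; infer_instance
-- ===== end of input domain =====

-- B replaces A's accumulator with membership tests and early return by one pass building
-- all prefixes plus a single set-cardinality comparison (objective: simpler).

-- ===== PORT A =====
-- fsInstance.split('-', 1)[0]  (split with a non-empty separator is always some and non-empty;
-- the [0] indexing is ported with pyGet?, which cannot fail here)
def pvFsName (s : String) : String :=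
  (PySem.List.pyGet? ((PySem.Str.splitMax? s "-" 1).getD []) 0).getD ""

def haveMultipleFsInstances_goA : List (Option String) → List String → Bool
  | [], _ => false
  | none :: rest, fsNameArray => haveMultipleFsInstances_goA rest fsNameArray
  | some fsInstance :: rest, fsNameArray =>
    let fsName := pvFsName fsInstance
    if fsName ∈ fsNameArray then true
    else haveMultipleFsInstances_goA rest (fsNameArray ++ [fsName])

def haveMultipleFsInstances_py (instances : List (Option String)) : Bool :=
  haveMultipleFsInstances_goA instances []

-- ===== PORT B =====
def haveMultipleFsInstances_py_alt (instances : List (Option String)) : Bool :=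
  let prefixes := instances.filterMap (fun o => o.map pvFsName)
  decide (prefixes.length ≠ (PySem.Set.ofList prefixes).length)

-- ===== PRECONDITION & SPEC =====
def Spec_haveMultipleFsInstances_py (instances : List (Option String)) (out : Bool) : Prop := out = haveMultipleFsInstances_py_alt instances
instance (instances : List (Option String)) (out : Bool) : Decidable (Spec_haveMultipleFsInstances_py instances out) := by unfold Spec_haveMultipleFsInstances_py; infer_instance

-- ===== CLAIM (what is proved, stated in full; the proofs are below) =====
def Claim_equal_haveMultipleFsInstances_py : Prop := ∀ (instances : List (Option String)), Dom_haveMultipleFsInstances_py instances → Spec_haveMultipleFsInstances_py instances (haveMultipleFsInstances_py instances)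

-- ===== LEMMAS AND PROOFS =====

-- set(xs) has as many elements as xs exactly when xs has no duplicates
theorem length_ofList_eq_iff (xs : List String) :
    (PySem.Set.ofList xs).length = xs.length ↔ xs.Nodup := by
  induction xs with
  | nil => simp [PySem.Set.ofList]
  | cons x xs ih =>
    rw [PySem.Set.ofList_cons]
    by_cases hx : x ∈ xs
    · have hxs : x ∈ PySem.Set.ofList xs := (PySem.Set.mem_ofList _ _).2 hx
      have hlt : ((PySem.Set.ofList xs).filter (fun y => !y == x)).length < (PySem.Set.ofList xs).length := by
        apply List.length_filter_lt_length_iff_exists.2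
        exact ⟨x, hxs, by simp⟩
      have hle := PySem.Set.length_ofList_le xs
      constructor
      · intro h
        exfalso
        simp only [PySem.Set.discard, List.length_cons] at h
        omega
      · intro h
        exact absurd hx (List.nodup_cons.1 h).1
    · have hdis : PySem.Set.discard (PySem.Set.ofList xs) x = PySem.Set.ofList xs := by
        unfold PySem.Set.discard
        apply List.filter_eq_self.2
        intro y hy
        have : y ∈ xs := (PySem.Set.mem_ofList _ _).1 hy
        simp only [Bool.not_eq_eq_eq_not, Bool.not_true, beq_eq_false_iff_ne, ne_eq]
        rintro rfl; exact hx this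
      rw [hdis]
      simp [List.nodup_cons, hx, ih]

-- A's loop returns true iff the accumulated prefixes plus the remaining ones contain a repeat
theorem goA_eq (l : List (Option String)) (acc : List String) (hacc : acc.Nodup) :
    haveMultipleFsInstances_goA l acc
      = !decide ((acc ++ l.filterMap (fun o => o.map pvFsName)).Nodup) := by
  induction l generalizing acc with
  | nil => simp [haveMultipleFsInstances_goA, hacc]
  | cons o rest ih =>
    cases o with
    | none => simpa [haveMultipleFsInstances_goA] using ih acc hacc
    | some s =>
      simp only [haveMultipleFsInstances_goA, List.filterMap_cons, Option.map_some]
      by_cases hmem : pvFsName s ∈ acc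
      · simp only [hmem, if_true]
        have : ¬ (acc ++ pvFsName s :: rest.filterMap (fun o => o.map pvFsName)).Nodup := by
          intro h
          have := (List.nodup_append.1 h).2.2
          exact this (pvFsName s) hmem (pvFsName s) (List.mem_cons_self ..) rfl
        simpa using this
      · simp only [hmem, if_false]
        have hacc' : (acc ++ [pvFsName s]).Nodup := by
          rw [List.nodup_append]
          refine ⟨hacc, List.nodup_singleton _, ?_⟩
          intro a ha b hb
          simp only [List.mem_singleton] at hb
          subst hb
          exact fun he => hmem (he ▸ ha)
        rw [ih _ hacc']
        simp

-- ===== VERDICT (by name: the statement is the Claim_ definition above) =====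
theorem haveMultipleFsInstances_py_spec : Claim_equal_haveMultipleFsInstances_py := by
  intro instances _
  unfold Spec_haveMultipleFsInstances_py haveMultipleFsInstances_py haveMultipleFsInstances_py_alt
  rw [goA_eq _ _ List.nodup_nil]
  simp only [List.nil_append]
  have hiff := length_ofList_eq_iff (instances.filterMap (fun o => o.map pvFsName))
  by_cases h : (instances.filterMap (fun o => o.map pvFsName)).Nodup
  · simp [h, (hiff.2 h).symm]
  · have h2 : (PySem.Set.ofList (instances.filterMap (fun o => o.map pvFsName))).length ≠ (instances.filterMap (fun o => o.map pvFsName)).length :=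
      fun hh => h (hiff.1 hh)
    simp [h, Ne.symm h2]
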